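-- pv_equiv track=rewrite | github.com/neulab/jsalt2019-informal | tagging-scripts/2p_pronouns_tv.py | identify_2p_pronouns
-- ===== SOURCE A (Python) =====
-- from collections import Counter, defaultdict
--
-- def identify_2p_pronouns(tokenised_input, lexicon):
-- 	counts = Counter(tokenised_input)
--
-- 	pronouns_dict = defaultdict(dict)
--
-- 	for k in lexicon:
-- 		for pronoun in lexicon[k]:
-- 			if counts[pronoun]:
-- 				pronouns_dict[k][pronoun] = counts[pronoun]
--
-- 	return(pronouns_dict)
-- ===== SOURCE B (Python) =====
-- from collections import Counter, defaultdict
--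
-- def identify_2p_pronouns(tokenised_input, lexicon):
-- 	# reverse index: pronoun -> categories that contain it
-- 	rev = {}
-- 	for k in lexicon:
-- 		for pronoun in lexicon[k]:
-- 			cats = rev.setdefault(pronoun, [])
-- 			if k not in cats:
-- 				cats.append(k)
--
-- 	# one pass over the input, counting only (category, token) pairs that match
-- 	hits = Counter()
-- 	for tok in tokenised_input:
-- 		for k in rev.get(tok, ()):
-- 			hits[(k, tok)] += 1
--
-- 	# assemble the per-category dicts in lexicon order
-- 	pronouns_dict = defaultdict(dict)
-- 	for k in lexicon:
-- 		for pronoun in lexicon[k]: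
-- 			if hits[(k, pronoun)]:
-- 				pronouns_dict[k][pronoun] = hits[(k, pronoun)]
--
-- 	return pronouns_dict
-- ===== Notes on version B (the rewrite author's own statement) =====
-- stated objective: alternative
-- what changed: Instead of counting every input token with Counter and then filtering by the lexicon, B builds a reverse index pronoun->categories from the lexicon and makes one matching-aware pass over the input that increments a (category, token) counter for each category of each matching token, then assembles the result in lexicon order.
import Mathlib
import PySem

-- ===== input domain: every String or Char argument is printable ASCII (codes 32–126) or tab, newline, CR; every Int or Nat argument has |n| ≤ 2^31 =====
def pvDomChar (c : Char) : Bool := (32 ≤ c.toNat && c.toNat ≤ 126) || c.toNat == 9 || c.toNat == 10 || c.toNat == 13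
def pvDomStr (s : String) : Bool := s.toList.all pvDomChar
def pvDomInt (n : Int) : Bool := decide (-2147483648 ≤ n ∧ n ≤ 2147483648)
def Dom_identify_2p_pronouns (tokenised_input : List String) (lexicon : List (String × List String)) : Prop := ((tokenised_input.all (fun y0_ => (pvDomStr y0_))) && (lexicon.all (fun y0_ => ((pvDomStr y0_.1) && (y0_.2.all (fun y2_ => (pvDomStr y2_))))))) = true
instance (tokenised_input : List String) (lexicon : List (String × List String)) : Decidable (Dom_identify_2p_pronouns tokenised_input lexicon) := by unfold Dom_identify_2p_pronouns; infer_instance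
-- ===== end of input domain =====

-- B replaces "Counter everything, then filter by the lexicon" with a reverse index
-- (pronoun -> categories) and one matching-aware counting pass over the input
-- (objective: alternative decomposition; same asymptotic cost).

-- ===== PORT A =====
def identify_2p_pronouns (tokenised_input : List String) (lexicon : List (String × List String)) : List (String × List (String × Int)) :=
  let counts : PySem.Dict String Int := PySem.Dict.counter tokenised_input
  let pronouns_dict : PySem.Dict String (PySem.Dict String Int) :=
    lexicon.foldl (fun pd kps =>
      kps.2.foldl (fun pd pronoun =>
        if counts.getD pronoun 0 ≠ 0 then
          pd.modify kps.1 PySem.Dict.empty (fun inner => inner.insert pronoun (counts.getD pronoun 0))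
        else pd) pd) PySem.Dict.empty
  pronouns_dict.items.map (fun kv => (kv.1, kv.2.items))

-- ===== PORT B =====
-- reverse index: pronoun -> list of categories that contain it (rev.setdefault + dedup append)
def pvRev (lexicon : List (String × List String)) : PySem.Dict String (List String) :=
  lexicon.foldl (fun r kps =>
    kps.2.foldl (fun r pronoun =>
      let cats := r.getD pronoun []
      if cats.contains kps.1 then r else r.insert pronoun (cats ++ [kps.1])) r) PySem.Dict.empty

-- one pass over the input: hits[(k, tok)] += 1 for every category k of tok
def pvHits (tokenised_input : List String) (rev : PySem.Dict String (List String)) : PySem.Dict (String × String) Int :=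
  tokenised_input.foldl (fun h tok =>
    (rev.getD tok []).foldl (fun h k => h.modify (k, tok) 0 (· + 1)) h) PySem.Dict.empty

def identify_2p_pronouns_alt (tokenised_input : List String) (lexicon : List (String × List String)) : List (String × List (String × Int)) :=
  let rev := pvRev lexicon
  let hits := pvHits tokenised_input rev
  let pronouns_dict : PySem.Dict String (PySem.Dict String Int) :=
    lexicon.foldl (fun pd kps =>
      kps.2.foldl (fun pd pronoun =>
        if hits.getD (kps.1, pronoun) 0 ≠ 0 then
          pd.modify kps.1 PySem.Dict.empty (fun inner => inner.insert pronoun (hits.getD (kps.1, pronoun) 0))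
        else pd) pd) PySem.Dict.empty
  pronouns_dict.items.map (fun kv => (kv.1, kv.2.items))

-- ===== PRECONDITION & SPEC =====
def Spec_identify_2p_pronouns (tokenised_input : List String) (lexicon : List (String × List String)) (out : List (String × List (String × Int))) : Prop := out = identify_2p_pronouns_alt tokenised_input lexicon
instance (tokenised_input : List String) (lexicon : List (String × List String)) (out : List (String × List (String × Int))) : Decidable (Spec_identify_2p_pronouns tokenised_input lexicon out) := by unfold Spec_identify_2p_pronouns; infer_instance

-- ===== CLAIM (what is proved, stated in full; the proofs are below) =====
def Claim_equal_identify_2p_pronouns : Prop := ∀ (tokenised_input : List String) (lexicon : List (String × List String)), Dom_identify_2p_pronouns tokenised_input lexicon → Spec_identify_2p_pronouns tokenised_input lexicon (identify_2p_pronouns tokenised_input lexicon)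

-- ===== LEMMAS AND PROOFS =====

-- one category's pass over its pronoun list keeps every per-pronoun category list Nodup
lemma pvRevInner_nodup (k : String) (ps : List String) (r : PySem.Dict String (List String))
    (h : ∀ q, (r.getD q []).Nodup) :
    ∀ q, ((ps.foldl (fun r pronoun =>
      let cats := r.getD pronoun []
      if cats.contains k then r else r.insert pronoun (cats ++ [k])) r).getD q []).Nodup := by
  induction ps generalizing r with
  | nil => exact h
  | cons p t ih =>
    simp only [List.foldl_cons]
    apply ih
    intro q
    show ((if (r.getD p []).contains k = true then r
           else r.insert p (r.getD p [] ++ [k])).getD q []).Nodup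
    by_cases hc : (r.getD p []).contains k = true
    · rw [if_pos hc]; exact h q
    · rw [if_neg hc, PySem.Dict.getD_insert]
      split_ifs with hq
      · subst hq
        have hk : k ∉ r.getD q [] := by
          rw [List.contains_eq_mem] at hc; simpa using hc
        exact List.Nodup.append (h q) (List.nodup_singleton k)
          (by simpa [List.disjoint_singleton] using hk)
      · exact h q

-- membership in a per-pronoun category list is preserved by the inner pass
lemma pvRevInner_mono (k' p : String) (k : String) (ps : List String)
    (r : PySem.Dict String (List String)) (h : k' ∈ r.getD p []) :
    k' ∈ ((ps.foldl (fun r pronoun =>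
      let cats := r.getD pronoun []
      if cats.contains k then r else r.insert pronoun (cats ++ [k])) r).getD p []) := by
  induction ps generalizing r with
  | nil => exact h
  | cons q t ih =>
    simp only [List.foldl_cons]
    apply ih
    show k' ∈ ((if (r.getD q []).contains k = true then r
                else r.insert q (r.getD q [] ++ [k])).getD p [])
    by_cases hc : (r.getD q []).contains k = true
    · rw [if_pos hc]; exact h
    · rw [if_neg hc, PySem.Dict.getD_insert]
      split_ifs with hq
      · subst hq; exact List.mem_append_left _ h
      · exact h

-- processing (k, ps) with p ∈ ps puts k into rev[p]
lemma pvRevInner_mem (k : String) (ps : List String) (p : String)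
    (r : PySem.Dict String (List String)) (hp : p ∈ ps) :
    k ∈ ((ps.foldl (fun r pronoun =>
      let cats := r.getD pronoun []
      if cats.contains k then r else r.insert pronoun (cats ++ [k])) r).getD p []) := by
  induction ps generalizing r with
  | nil => cases hp
  | cons q t ih =>
    simp only [List.foldl_cons]
    rcases List.mem_cons.mp hp with hq | ht
    · subst hq
      apply pvRevInner_mono
      show k ∈ ((if (r.getD p []).contains k = true then r
                 else r.insert p (r.getD p [] ++ [k])).getD p [])
      by_cases hc : (r.getD p []).contains k = true
      · rw [if_pos hc, ← List.contains_iff_mem]; exact hc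
      · rw [if_neg hc, PySem.Dict.getD_insert]; simp
    · exact ih _ ht

lemma pvRevOuter_mono (k' p : String) (lexicon : List (String × List String))
    (r : PySem.Dict String (List String)) (h : k' ∈ r.getD p []) :
    k' ∈ ((lexicon.foldl (fun r kps =>
      kps.2.foldl (fun r pronoun =>
        let cats := r.getD pronoun []
        if cats.contains kps.1 then r else r.insert pronoun (cats ++ [kps.1])) r) r).getD p []) := by
  induction lexicon generalizing r with
  | nil => exact h
  | cons kps t ih =>
    simp only [List.foldl_cons]
    exact ih _ (pvRevInner_mono k' p kps.1 kps.2 r h)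

lemma pvRev_mem (lexicon : List (String × List String)) (k : String) (ps : List String) (p : String)
    (hk : (k, ps) ∈ lexicon) (hp : p ∈ ps) : k ∈ (pvRev lexicon).getD p [] := by
  unfold pvRev
  generalize (PySem.Dict.empty : PySem.Dict String (List String)) = r
  induction lexicon generalizing r with
  | nil => cases hk
  | cons kps t ih =>
    simp only [List.foldl_cons]
    rcases List.mem_cons.mp hk with he | ht
    · subst he
      exact pvRevOuter_mono k p t _ (pvRevInner_mem k ps p r hp)
    · exact ih ht _

lemma pvRev_nodup (lexicon : List (String × List String)) :
    ∀ q, ((pvRev lexicon).getD q []).Nodup := by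
  unfold pvRev
  generalize hr : (PySem.Dict.empty : PySem.Dict String (List String)) = r
  have h0 : ∀ q, (r.getD q []).Nodup := by
    intro q; rw [← hr]; simp [PySem.Dict.getD_empty]
  clear hr
  induction lexicon generalizing r with
  | nil => exact h0
  | cons kps t ih =>
    simp only [List.foldl_cons]
    exact ih _ (pvRevInner_nodup kps.1 kps.2 r h0)

-- counting pairs whose second component is pinned
lemma pvCountMapPair (lst : List String) (tok k p : String) :
    ((lst.map (fun k' => (k', tok))).count (k, p)) = if tok = p then lst.count k else 0 := by
  induction lst with
  | nil => simp
  | cons a t ih =>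
    simp only [List.map_cons, List.count_cons, ih]
    by_cases htp : tok = p <;> by_cases hak : a = k <;>
      simp [htp, hak, Prod.ext_iff]

lemma pvHits_getD_aux (tokenised_input : List String) (rev : PySem.Dict String (List String))
    (k p : String) :
    ∀ h : PySem.Dict (String × String) Int,
    ((tokenised_input.foldl (fun h tok =>
        (rev.getD tok []).foldl (fun h k => h.modify (k, tok) 0 (· + 1)) h) h).getD (k, p) 0)
      = h.getD (k, p) 0 + ((rev.getD p []).count k : Int) * (tokenised_input.count p : Int) := by
  induction tokenised_input with
  | nil => intro h; simp
  | cons tok t ih =>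
    intro h
    simp only [List.foldl_cons]
    rw [ih]
    have hstep : (((rev.getD tok []).foldl (fun h k => h.modify (k, tok) 0 (· + 1)) h).getD (k, p) 0)
        = h.getD (k, p) 0 + (((rev.getD tok []).map (fun k' => (k', tok))).count (k, p) : Int) := by
      rw [← List.foldl_map (f := fun k' => (k', tok))
            (g := fun (h : PySem.Dict (String × String) Int) x => h.modify x 0 (· + 1))]
      exact PySem.Dict.getD_foldl_modify_add_one _ _ _
    rw [hstep, pvCountMapPair, List.count_cons]
    by_cases htp : tok = p
    · subst htp
      simp only [BEq.rfl, if_true]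
      push_cast
      ring
    · have hb : (tok == p) = false := by simpa using htp
      simp only [if_neg htp, hb, Bool.false_eq_true, if_false, Nat.cast_zero, add_zero]

lemma pvHits_count (tokenised_input : List String) (lexicon : List (String × List String))
    (k : String) (ps : List String) (p : String)
    (hk : (k, ps) ∈ lexicon) (hp : p ∈ ps) :
    (pvHits tokenised_input (pvRev lexicon)).getD (k, p) 0 = (tokenised_input.count p : Int) := by
  unfold pvHits
  rw [pvHits_getD_aux]
  have hmem : k ∈ (pvRev lexicon).getD p [] := pvRev_mem lexicon k ps p hk hp
  have h1 : ((pvRev lexicon).getD p []).count k = 1 :=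
    le_antisymm (List.nodup_iff_count_le_one.mp (pvRev_nodup lexicon p) k)
      (List.one_le_count_iff.mpr hmem)
  simp [h1, PySem.Dict.getD_empty]

-- ===== VERDICT (by name: the statement is the Claim_ definition above) =====
theorem identify_2p_pronouns_spec : Claim_equal_identify_2p_pronouns := by
  intro tokenised_input lexicon _
  show identify_2p_pronouns tokenised_input lexicon = identify_2p_pronouns_alt tokenised_input lexicon
  unfold identify_2p_pronouns identify_2p_pronouns_alt
  simp only []
  congr 2
  apply PySem.List.foldl_congr_mem
  intro pd kps hkps
  apply PySem.List.foldl_congr_mem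
  intro pd' p hp
  have hh : (pvHits tokenised_input (pvRev lexicon)).getD (kps.1, p) 0
      = (tokenised_input.count p : Int) :=
    pvHits_count tokenised_input lexicon kps.1 kps.2 p (by simpa using hkps) hp
  rw [PySem.Dict.getD_counter, hh]
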